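-- pv_equiv track=rewrite | github.com/liupengsay/PyIsTheBestLang | src/dp/state_dp.py | lc_1655
-- ===== SOURCE A (Python) =====
-- from typing import List
-- from collections import Counter
-- from functools import lru_cache
-- import heapq
--
-- def lc_1655(nums: List[int], quantity: List[int]) -> bool:
--     # 模板：经典线性索引加枚举子集状压DP
--     @lru_cache(None)
--     def dfs(i, state):
--         if not state:
--             return True
--         if i == m:
--             return False
--         x = cnt[i]
--         sub = state
--         while sub:
--             cost = sum(quantity[j] for j in range(n) if sub & (1 << j))
--             if cost <= x and dfs(i + 1, state ^ sub):
--                 return True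
--             sub = (sub - 1) & state
--         return False
--
--     cnt = list(Counter(nums).values())
--     n = len(quantity)
--     cnt = heapq.nlargest(n, cnt)
--     m = len(cnt)
--     return dfs(0, (1 << n) - 1)
-- ===== SOURCE B (Python) =====
-- from collections import Counter
--
--
-- def lc_1655(nums, quantity):
--     n = len(quantity)
--     counts = sorted(Counter(nums).values(), reverse=True)[:n]
--     m = len(counts)
--     full = (1 << n) - 1
--     if full == 0:
--         return True
--
--     # subset sums of quantity, computed at most once per mask (highest-bit stripping)
--     ss = {0: 0}
--
--     def ssum(mask):
--         path = []
--         mk = mask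
--         while mk not in ss:
--             path.append(mk)
--             mk -= 1 << (mk.bit_length() - 1)
--         acc = ss[mk]
--         for p in reversed(path):
--             acc += quantity[p.bit_length() - 1]
--             ss[p] = acc
--         return acc if not path else ss[mask]
--
--     # iterative backtracking over an explicit stack of frames (i, state, sub):
--     # level i, customers still unserved `state`, submasks sub,... left to try.
--     # Any success unwinds the whole search, so only failures need remembering.
--     failed = set()
--     stack = [(0, full, full)]
--     while stack:
--         i, state, sub = stack.pop()
--         if i >= m:
--             failed.add((i, state))
--             continue
--         x = counts[i]
--         pushed = False
--         while sub:
--             if ssum(sub) <= x: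
--                 child = state ^ sub
--                 if child == 0:
--                     return True
--                 if i + 1 < m and (i + 1, child) not in failed:
--                     stack.append((i, state, (sub - 1) & state))
--                     stack.append((i + 1, child, child))
--                     pushed = True
--                     break
--             sub = (sub - 1) & state
--         if not pushed:
--             failed.add((i, state))
--     return False
-- ===== Notes on version B (the rewrite author's own statement) =====
-- stated objective: alternative
-- what changed: A is a memoized recursive DFS (lru_cache over (i,state)) that re-sums quantity over all n bit positions for every submask it tries; B replaces the recursion by an iterative backtracking machine over an explicit stack of (level, state, submask) frames, replaces the cache by a set of failed states (any success terminates the whole search, so only failures are worth remembering), and computes each submask's quantity-sum at most once via highest-bit stripping.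
import Mathlib
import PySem

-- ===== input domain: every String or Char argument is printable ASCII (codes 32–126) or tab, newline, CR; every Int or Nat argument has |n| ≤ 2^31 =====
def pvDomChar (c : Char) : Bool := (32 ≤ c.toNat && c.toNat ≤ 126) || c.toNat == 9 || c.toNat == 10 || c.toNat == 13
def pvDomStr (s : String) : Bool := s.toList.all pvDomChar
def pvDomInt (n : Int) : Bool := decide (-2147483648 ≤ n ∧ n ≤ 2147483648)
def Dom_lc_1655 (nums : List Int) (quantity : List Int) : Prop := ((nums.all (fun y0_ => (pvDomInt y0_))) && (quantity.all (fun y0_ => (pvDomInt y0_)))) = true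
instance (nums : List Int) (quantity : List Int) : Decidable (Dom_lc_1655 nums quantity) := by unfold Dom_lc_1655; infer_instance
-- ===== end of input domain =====

-- B replaces A's memoized recursion (which re-sums quantity over all n bit positions for every
-- submask it tries) by an iterative backtracking machine over an explicit stack of frames, with
-- a set of failed states instead of an lru_cache and subset sums computed at most once per mask.

-- ===== PORT A =====

-- termination helpers, cited by name inside the ports' decreasing_by blocks
lemma lc1655SubDec (state sub : Nat) (h : sub ≠ 0) : (sub - 1) &&& state < sub := by
  have : (sub - 1) &&& state ≤ sub - 1 := Nat.and_le_left
  omega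

-- sum(quantity[j] for j in range(n) if sub & (1 << j)); range(n) with n : Nat is List.range n (exact)
def lc1655CostA (quantity : List Int) (n : Nat) (sub : Nat) : Int :=
  (((List.range n).filter (fun j => decide (sub &&& (1 <<< j) ≠ 0))).map
    (fun (j : Nat) => (PySem.List.pyGet? quantity (j : Int)).getD 0)).sum

-- the inner `while sub:` loop of dfs; `next` is `dfs(i + 1, ·)`
def lc1655LoopA (quantity : List Int) (n : Nat) (x : Int) (next : Nat → Bool)
    (state sub : Nat) : Bool :=
  if h : sub = 0 then false
  else
    let cost := lc1655CostA quantity n sub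
    if cost ≤ x && next (state ^^^ sub) then true
    else lc1655LoopA quantity n x next state ((sub - 1) &&& state)
termination_by sub
decreasing_by exact lc1655SubDec state sub h

-- dfs(i, state); Python tests `i == m`: since i starts at 0 and only increments below m,
-- i never exceeds m, so the totality guard `m ≤ i` is exact on every reachable call.
def lc1655Dfs (cnt quantity : List Int) (n m : Nat) (i state : Nat) : Bool :=
  if state = 0 then true
  else if m ≤ i then false
  else
    lc1655LoopA quantity n ((PySem.List.pyGet? cnt (i : Int)).getD 0)
      (fun t => lc1655Dfs cnt quantity n m (i + 1) t) state state
termination_by m - i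
decreasing_by omega

def lc_1655 (nums : List Int) (quantity : List Int) : Bool :=
  let cnt0 := (PySem.Dict.counter nums).values          -- list(Counter(nums).values())
  let n := quantity.length
  let cnt := (PySem.List.sorted cnt0 (fun v => v) true).take n  -- heapq.nlargest(n, cnt) = sorted(cnt, reverse=True)[:n]
  let m := cnt.length
  lc1655Dfs cnt quantity n m 0 ((1 <<< n) - 1)

-- ===== PORT B =====

lemma lc1655StripDec (m : Nat) (h : ¬ m = 0) :
    m - (1 <<< (PySem.Int.bitLength (m : Int) - 1)) < m := by
  have h1 : (1:Nat) ≤ 1 <<< (PySem.Int.bitLength (m : Int) - 1) := by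
    rw [Nat.one_shiftLeft]; exact Nat.one_le_two_pow
  omega

-- Source B's ssum strips the highest bit of mask step by step, accumulating quantity[bit_length-1];
-- its dict `ss` only caches values of this pure function, so the port is the uncached function.
def lc1655SsumLoop (quantity : List Int) (m : Nat) (r : Int) : Int :=
  if _h : m = 0 then r
  else
    let hi := PySem.Int.bitLength (m : Int) - 1
    lc1655SsumLoop quantity (m - (1 <<< hi)) (r + (PySem.List.pyGet? quantity (hi : Int)).getD 0)
termination_by m
decreasing_by exact lc1655StripDec m _h

def lc1655Ssum (quantity : List Int) (mask : Nat) : Int :=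
  lc1655SsumLoop quantity mask 0

-- outcome of one frame's inner `while sub:` scan
inductive Lc1655Act where
  | found0 : Lc1655Act                    -- `return True` (a viable submask serves everyone left)
  | push : Nat → Nat → Lc1655Act          -- push (parent resumes at nsub, new child frame)
  | exhausted : Lc1655Act                 -- `if not pushed: failed.add((i, state))`
deriving DecidableEq

-- the inner `while sub:` loop of Source B's machine step; `(i+1, child) not in failed` is
-- PySem.Set non-membership (Set.contains_iff)
def lc1655ScanB (q : List Int) (x : Int) (i m : Nat) (failed : PySem.Set (Nat × Nat))
    (state sub : Nat) : Lc1655Act :=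
  if h : sub = 0 then .exhausted
  else if lc1655Ssum q sub ≤ x then
    if state ^^^ sub = 0 then .found0        -- child := state ^ sub
    else if i + 1 < m ∧ (i + 1, state ^^^ sub) ∉ failed then
      .push ((sub - 1) &&& state) (state ^^^ sub)
    else lc1655ScanB q x i m failed state ((sub - 1) &&& state)
  else lc1655ScanB q x i m failed state ((sub - 1) &&& state)
termination_by sub
decreasing_by all_goals exact lc1655SubDec state sub h

-- the machine's termination measure, and its two decrease lemmas (cited in decreasing_by)
def lc1655Measure (n m : Nat) (stack : List (Nat × Nat × Nat)) : Nat :=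
  (stack.map (fun f => (2 * f.2.2 + 2) * (2 * 2 ^ n + 4) ^ (m - f.1))).sum

lemma lc1655PopDec (n m : Nat) (i state sub : Nat) (rest : List (Nat × Nat × Nat)) :
    lc1655Measure n m rest < lc1655Measure n m ((i, state, sub) :: rest) := by
  unfold lc1655Measure
  simp only [List.map_cons, List.sum_cons]
  have : 1 ≤ (2 * sub + 2) * (2 * 2 ^ n + 4) ^ (m - i) :=
    Nat.one_le_iff_ne_zero.mpr (by positivity)
  omega

lemma lc1655PushDec (n m : Nat) (i state sub nsub child : Nat) (rest : List (Nat × Nat × Nat))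
    (him : ¬ m ≤ i) (hsub0 : sub ≠ 0) :
    lc1655Measure n m
        ((i + 1, min child (2 ^ n - 1), min child (2 ^ n - 1)) ::
          (i, state, min nsub (sub - 1)) :: rest) <
      lc1655Measure n m ((i, state, sub) :: rest) := by
  unfold lc1655Measure
  simp only [List.map_cons, List.sum_cons]
  have hchild : min child (2 ^ n - 1) ≤ 2 ^ n - 1 := Nat.min_le_right _ _
  have hnsub : min nsub (sub - 1) ≤ sub - 1 := Nat.min_le_right _ _
  have hk : m - i = (m - (i + 1)) + 1 := by omega
  set M := 2 * 2 ^ n + 4 with hM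
  set k := m - (i + 1) with hkdef
  rw [hk, pow_succ]
  have hpos : 1 ≤ M ^ k := Nat.one_le_iff_ne_zero.mpr (by positivity)
  have hc2 : (2 * min child (2 ^ n - 1) + 2) * M ^ k < M ^ k * M := by
    have h2n : 1 ≤ 2 ^ n := Nat.one_le_two_pow
    have hlt : 2 * min child (2 ^ n - 1) + 2 < M := by omega
    calc (2 * min child (2 ^ n - 1) + 2) * M ^ k < M * M ^ k :=
          Nat.mul_lt_mul_of_lt_of_le hlt le_rfl (by positivity)
      _ = M ^ k * M := by ring
  have hp2 : (2 * min nsub (sub - 1) + 2) * (M ^ k * M) + M ^ k * M ≤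
      (2 * sub + 2) * (M ^ k * M) := by
    have : 2 * min nsub (sub - 1) + 2 + 1 ≤ 2 * sub + 2 := by omega
    nlinarith [Nat.one_le_iff_ne_zero.mpr (show M ^ k * M ≠ 0 by positivity)]
  omega

-- the `while stack:` machine; frames are (i, state, sub).  The bound-check on (state, sub) is a
-- totality guard only: every frame the machine creates satisfies it (proved in the claim's lemmas).
def lc1655RunB (q counts : List Int) (n m : Nat) :
    List (Nat × Nat × Nat) → PySem.Set (Nat × Nat) → Bool
  | [], _ => false
  | (i, state, sub) :: rest, failed =>
    if him : m ≤ i then lc1655RunB q counts n m rest (failed.add (i, state))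
    else if hb : state < 2 ^ n ∧ sub < 2 ^ n ∧ sub ≠ 0 then
      match lc1655ScanB q ((PySem.List.pyGet? counts (i : Int)).getD 0) i m failed state sub with
      | .found0 => true
      | .push nsub child =>
          -- the two `min`s are totality clamps only: a `.push` always has nsub ≤ sub - 1, and
          -- child < 2^n on frames within bounds (proved in the claim's lemmas), so they are identities
          lc1655RunB q counts n m
            ((i + 1, min child (2 ^ n - 1), min child (2 ^ n - 1)) ::
              (i, state, min nsub (sub - 1)) :: rest) failed
      | .exhausted => lc1655RunB q counts n m rest (failed.add (i, state))
    else lc1655RunB q counts n m rest failed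
termination_by stack _ => lc1655Measure n m stack
decreasing_by
  · exact lc1655PopDec n m i state sub rest
  · exact lc1655PushDec n m i state sub nsub child rest him hb.2.2
  · exact lc1655PopDec n m i state sub rest
  · exact lc1655PopDec n m i state sub rest

def lc_1655_alt (nums : List Int) (quantity : List Int) : Bool :=
  let n := quantity.length
  let counts := (PySem.List.sorted (PySem.Dict.counter nums).values (fun v => v) true).take n
  let m := counts.length
  let full := (1 <<< n) - 1
  if full = 0 then true
  else lc1655RunB quantity counts n m [(0, full, full)] PySem.Set.empty

-- ===== PRECONDITION & SPEC =====
def Spec_lc_1655 (nums : List Int) (quantity : List Int) (out : Bool) : Prop := out = lc_1655_alt nums quantity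
instance (nums : List Int) (quantity : List Int) (out : Bool) : Decidable (Spec_lc_1655 nums quantity out) := by unfold Spec_lc_1655; infer_instance

-- ===== CLAIM (what is proved, stated in full; the proofs are below) =====
def Claim_equal_lc_1655 : Prop := ∀ (nums : List Int) (quantity : List Int), Dom_lc_1655 nums quantity → Spec_lc_1655 nums quantity (lc_1655 nums quantity)

-- ===== LEMMAS AND PROOFS =====

-- a filtered-map sum over range n as a Finset sum
lemma sum_map_filter_range (n : Nat) (p : Nat → Bool) (f : Nat → Int) :
    (((List.range n).filter p).map f).sum = ∑ j ∈ Finset.range n, if p j then f j else 0 := by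
  induction n with
  | zero => simp
  | succ k ih =>
    rw [List.range_succ, List.filter_append, List.map_append, List.sum_append,
      Finset.sum_range_succ, ih]
    cases h : p k <;> simp [h]

-- A's generator sum as a Finset sum over tested bits
lemma costA_eq_finset (q : List Int) (n : Nat) (sub : Nat) :
    lc1655CostA q n sub =
      ∑ j ∈ Finset.range n,
        if sub.testBit j then (PySem.List.pyGet? q (j : Int)).getD 0 else 0 := by
  unfold lc1655CostA
  rw [sum_map_filter_range]
  refine Finset.sum_congr rfl fun j _ => ?_
  have hbit : (decide (sub &&& (1 <<< j) ≠ 0)) = sub.testBit j := by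
    rw [Nat.one_shiftLeft, Nat.and_two_pow]
    cases h : sub.testBit j <;> simp
  rw [hbit]

-- B's per-mask subset sum equals A's per-try cost on every mask below 2^n
lemma ssumLoop_eq_costA (q : List Int) (n : Nat) :
    ∀ mask, mask < 2 ^ n → ∀ r, lc1655SsumLoop q mask r = r + lc1655CostA q n mask := by
  intro mask
  induction mask using Nat.strong_induction_on with
  | _ mask ih =>
    intro hlt r
    by_cases h0 : mask = 0
    · subst h0
      rw [lc1655SsumLoop, costA_eq_finset]
      simp [Nat.zero_testBit]
    · set e := PySem.Int.bitLength (mask : Int) - 1 with he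
      have hbl : PySem.Int.bitLength (mask : Int) ≠ 0 := by
        intro h
        have := PySem.Int.lt_two_pow_bitLength (mask : Int)
        rw [h] at this
        simp [Int.natAbs_natCast] at this
        omega
      have hle : 2 ^ e ≤ mask := by
        have := PySem.Int.two_pow_bitLength_le (mask : Int) (by exact_mod_cast h0)
        simpa [he, Int.natAbs_natCast] using this
      have hltp : mask < 2 ^ (e + 1) := by
        have := PySem.Int.lt_two_pow_bitLength (mask : Int)
        have he1 : e + 1 = PySem.Int.bitLength (mask : Int) := by omega
        rw [he1]
        simpa [Int.natAbs_natCast] using this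
      set rest := mask - (1 <<< e) with hrest
      have hmask : mask = 2 ^ e + rest := by
        rw [hrest, Nat.one_shiftLeft]; omega
      have hrlt : rest < 2 ^ e := by
        have : 2 ^ (e + 1) = 2 ^ e + 2 ^ e := by ring
        omega
      have hen : e < n := by
        have : 2 ^ e < 2 ^ n := lt_of_le_of_lt hle hlt
        exact (Nat.pow_lt_pow_iff_right (by omega)).mp this
      have hbt : ∀ j, mask.testBit j = (rest.testBit j || decide (j = e)) := by
        intro j
        rcases lt_trichotomy j e with hj | hj | hj
        · rw [hmask, Nat.testBit_two_pow_add_gt hj]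
          simp [Nat.ne_of_lt hj]
        · subst hj
          rw [hmask, Nat.testBit_two_pow_add_eq, Nat.testBit_lt_two_pow hrlt]
          simp
        · have h1 : mask.testBit j = false :=
            Nat.testBit_lt_two_pow (lt_of_lt_of_le hltp (Nat.pow_le_pow_right (by omega) hj))
          have h2 : rest.testBit j = false :=
            Nat.testBit_lt_two_pow (lt_of_lt_of_le hrlt (Nat.pow_le_pow_right (by omega) (by omega)))
          simp [h1, h2, Nat.ne_of_gt hj]
      have hrec : rest < mask := by omega
      rw [lc1655SsumLoop]
      simp only [h0, dite_false]
      rw [← he, ← hrest]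
      rw [ih rest hrec (lt_trans hrlt (lt_of_le_of_lt hle hlt))]
      rw [costA_eq_finset, costA_eq_finset]
      have hsplit : ∀ j ∈ Finset.range n,
          (if mask.testBit j then (PySem.List.pyGet? q (j : Int)).getD 0 else 0) =
          (if rest.testBit j then (PySem.List.pyGet? q (j : Int)).getD 0 else 0) +
          (if j = e then (PySem.List.pyGet? q ((e : Nat) : Int)).getD 0 else 0) := by
        intro j _
        rw [hbt j]
        by_cases hje : j = e
        · subst hje
          simp [Nat.testBit_lt_two_pow hrlt]
        · simp [hje]
      rw [Finset.sum_congr rfl hsplit, Finset.sum_add_distrib,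
        Finset.sum_ite_eq' (Finset.range n) e]
      simp [Finset.mem_range.mpr hen]
      ring

lemma ssum_eq_costA (q : List Int) (n : Nat) (mask : Nat) (h : mask < 2 ^ n) :
    lc1655Ssum q mask = lc1655CostA q n mask := by
  rw [lc1655Ssum, ssumLoop_eq_costA q n mask h 0, zero_add]

-- what a `.push` outcome guarantees about its fields
lemma lc1655ScanB_push (q : List Int) (x : Int) (i m : Nat) (failed : PySem.Set (Nat × Nat))
    (state : Nat) :
    ∀ sub nsub child, lc1655ScanB q x i m failed state sub = .push nsub child →
      nsub < sub ∧ i + 1 < m ∧ ∀ n : Nat, state < 2 ^ n → sub < 2 ^ n → child < 2 ^ n := by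
  intro sub
  induction sub using Nat.strong_induction_on with
  | _ sub ih =>
    intro nsub child h
    rw [lc1655ScanB] at h
    by_cases h0 : sub = 0
    · simp [h0] at h
    · simp only [h0, dite_false] at h
      have hand : (sub - 1) &&& state ≤ sub - 1 := Nat.and_le_left
      by_cases hc : lc1655Ssum q sub ≤ x
      · rw [if_pos hc] at h
        by_cases hch : state ^^^ sub = 0
        · rw [if_pos hch] at h
          exact absurd h (by simp)
        · rw [if_neg hch] at h
          by_cases hp : i + 1 < m ∧ (i + 1, state ^^^ sub) ∉ failed
          · rw [if_pos hp] at h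
            injection h with h1 h2
            subst h1; subst h2
            exact ⟨by omega, hp.1, fun n hs hu => Nat.xor_lt_two_pow hs hu⟩
          · rw [if_neg hp] at h
            obtain ⟨ha, hb, hc'⟩ := ih _ (by omega) nsub child h
            exact ⟨by omega, hb, fun n hs hu => hc' n hs (by omega)⟩
      · rw [if_neg hc] at h
        obtain ⟨ha, hb, hc'⟩ := ih _ (by omega) nsub child h
        exact ⟨by omega, hb, fun n hs hu => hc' n hs (by omega)⟩

-- what a frame is worth: false above the last count, else A's loop from its stored submask
def lc1655Eval (cnt q : List Int) (n m : Nat) (f : Nat × Nat × Nat) : Bool :=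
  if m ≤ f.1 then false
  else lc1655LoopA q n ((PySem.List.pyGet? cnt (f.1 : Int)).getD 0)
    (fun t => lc1655Dfs cnt q n m (f.1 + 1) t) f.2.1 f.2.2

-- every recorded failure is a real dfs failure
def lc1655Sound (cnt q : List Int) (n m : Nat) (failed : PySem.Set (Nat × Nat)) : Prop :=
  ∀ p ∈ failed, lc1655Dfs cnt q n m p.1 p.2 = false

-- stack well-formedness: bounds, and (conditionally on everything above failing) each frame's
-- remaining loop agrees with its full loop
def lc1655Good (cnt q : List Int) (n m : Nat) : List (Nat × Nat × Nat) → Prop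
  | [] => True
  | f :: rest =>
      (f.2.1 < 2 ^ n ∧ f.2.2 < 2 ^ n ∧ f.2.1 ≠ 0 ∧
        (¬ m ≤ f.1 →
          lc1655LoopA q n ((PySem.List.pyGet? cnt (f.1 : Int)).getD 0)
            (fun t => lc1655Dfs cnt q n m (f.1 + 1) t) f.2.1 f.2.1 =
          lc1655LoopA q n ((PySem.List.pyGet? cnt (f.1 : Int)).getD 0)
            (fun t => lc1655Dfs cnt q n m (f.1 + 1) t) f.2.1 f.2.2)) ∧
      (lc1655Eval cnt q n m f = false → lc1655Good cnt q n m rest)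

-- how one scan outcome reads in terms of A's loop
lemma scanB_char (cnt q : List Int) (n m : Nat) (failed : PySem.Set (Nat × Nat))
    (hS : lc1655Sound cnt q n m failed) (i : Nat) (him : i < m) (state : Nat)
    (hstate : state < 2 ^ n) :
    ∀ sub, sub < 2 ^ n →
      (lc1655ScanB q ((PySem.List.pyGet? cnt (i : Int)).getD 0) i m failed state sub =
          .exhausted →
        lc1655LoopA q n ((PySem.List.pyGet? cnt (i : Int)).getD 0)
          (fun t => lc1655Dfs cnt q n m (i + 1) t) state sub = false) ∧
      (lc1655ScanB q ((PySem.List.pyGet? cnt (i : Int)).getD 0) i m failed state sub =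
          .found0 →
        lc1655LoopA q n ((PySem.List.pyGet? cnt (i : Int)).getD 0)
          (fun t => lc1655Dfs cnt q n m (i + 1) t) state sub = true) ∧
      (∀ nsub child,
        lc1655ScanB q ((PySem.List.pyGet? cnt (i : Int)).getD 0) i m failed state sub =
            .push nsub child →
        lc1655LoopA q n ((PySem.List.pyGet? cnt (i : Int)).getD 0)
            (fun t => lc1655Dfs cnt q n m (i + 1) t) state sub =
          (lc1655Dfs cnt q n m (i + 1) child ||
            lc1655LoopA q n ((PySem.List.pyGet? cnt (i : Int)).getD 0)
              (fun t => lc1655Dfs cnt q n m (i + 1) t) state nsub) ∧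
          child ≠ 0 ∧ child < 2 ^ n ∧ nsub < 2 ^ n ∧ i + 1 < m ∧
          lc1655Dfs cnt q n m (i + 1) child =
            lc1655LoopA q n ((PySem.List.pyGet? cnt ((i + 1 : Nat) : Int)).getD 0)
              (fun t => lc1655Dfs cnt q n m (i + 2) t) child child) := by
  intro sub
  induction sub using Nat.strong_induction_on with
  | _ sub ih =>
    intro hsub
    set x := (PySem.List.pyGet? cnt (i : Int)).getD 0 with hx
    by_cases h0 : sub = 0
    · subst h0
      refine ⟨fun _ => by rw [lc1655LoopA]; simp, fun hc => ?_, fun nsub child hc => ?_⟩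
      · rw [lc1655ScanB] at hc; simp at hc
      · rw [lc1655ScanB] at hc; simp at hc
    · have hnle : (sub - 1) &&& state ≤ sub - 1 := Nat.and_le_left
      have hnsub2 : (sub - 1) &&& state < 2 ^ n := by omega
      have hxlt : state ^^^ sub < 2 ^ n := Nat.xor_lt_two_pow hstate hsub
      have hcost : lc1655Ssum q sub = lc1655CostA q n sub := ssum_eq_costA q n sub hsub
      obtain ⟨ihE, ihF, ihP⟩ := ih ((sub - 1) &&& state) (by omega) hnsub2
      rw [lc1655ScanB]
      simp only [h0, dite_false]
      rw [lc1655LoopA]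
      simp only [h0, dite_false]
      by_cases hc : lc1655Ssum q sub ≤ x
      · rw [if_pos hc]
        have hcx : decide (lc1655CostA q n sub ≤ x) = true := by
          rw [← hcost]; exact decide_eq_true hc
        by_cases hch0 : state ^^^ sub = 0
        · rw [if_pos hch0]
          have hnext : lc1655Dfs cnt q n m (i + 1) (state ^^^ sub) = true := by
            rw [hch0, lc1655Dfs]; simp
          refine ⟨fun hc' => by simp at hc', fun _ => ?_, fun nsub child hc' => by simp at hc'⟩
          simp [hcx, hnext]
        · rw [if_neg hch0]
          by_cases hp : i + 1 < m ∧ (i + 1, state ^^^ sub) ∉ failed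
          · rw [if_pos hp]
            refine ⟨fun hc' => by simp at hc', fun hc' => by simp at hc',
              fun nsub child hc' => ?_⟩
            injection hc' with h1 h2
            subst h1; subst h2
            refine ⟨?_, hch0, hxlt, hnsub2, hp.1, ?_⟩
            · simp only [hcx, Bool.true_and]
              cases hd : lc1655Dfs cnt q n m (i + 1) (state ^^^ sub) <;> simp
            · rw [lc1655Dfs]
              simp only [hch0, ite_false]
              rw [if_neg (by omega)]
          · rw [if_neg hp]
            have hdfalse : lc1655Dfs cnt q n m (i + 1) (state ^^^ sub) = false := by
              by_cases hm2 : m ≤ i + 1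
              · rw [lc1655Dfs]
                simp only [hch0, ite_false]
                rw [if_pos hm2]
              · have hmem : (i + 1, state ^^^ sub) ∈ failed := by
                  by_contra hnm
                  exact hp ⟨by omega, hnm⟩
                exact hS _ hmem
            simp only [hcx, Bool.true_and, hdfalse, Bool.false_eq_true, if_false]
            exact ⟨ihE, ihF, ihP⟩
      · rw [if_neg hc]
        have hcx : decide (lc1655CostA q n sub ≤ x) = false := by
          rw [← hcost]; exact decide_eq_false hc
        simp only [hcx, Bool.false_and, Bool.false_eq_true, if_false]
        exact ⟨ihE, ihF, ihP⟩

-- the machine computes the disjunction of its frames' values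
lemma runB_eq_any (cnt q : List Int) (n m : Nat) :
    ∀ stack failed, lc1655Sound cnt q n m failed → lc1655Good cnt q n m stack →
      lc1655RunB q cnt n m stack failed = stack.any (lc1655Eval cnt q n m) := by
  intro stack failed
  induction stack, failed using lc1655RunB.induct q cnt n m with
  | case1 failed => intro _ _; rw [lc1655RunB]; rfl
  | case2 i state sub rest failed him ih =>
    intro hS hG
    obtain ⟨⟨hs1, hs2, hs0, hlink⟩, htail⟩ := hG
    have hevalf : lc1655Eval cnt q n m (i, state, sub) = false := by
      unfold lc1655Eval; exact if_pos him
    have hdf : lc1655Dfs cnt q n m i state = false := by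
      rw [lc1655Dfs, if_neg hs0, if_pos him]
    have hS' : lc1655Sound cnt q n m (failed.add (i, state)) := by
      intro p hp
      rcases (PySem.Set.mem_add _ _ _).mp hp with h | h
      · exact hS p h
      · subst h; exact hdf
    rw [lc1655RunB, dif_pos him, ih hS' (htail hevalf)]
    simp [hevalf]
  | case3 i state sub rest failed him hb hscan =>
    intro hS hG
    obtain ⟨⟨hs1, hs2, hs0, hlink⟩, htail⟩ := hG
    have hloop := ((scanB_char cnt q n m failed hS i (by omega) state hb.1 sub hb.2.1).2.1) hscan
    have hevalf : lc1655Eval cnt q n m (i, state, sub) = true := by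
      unfold lc1655Eval; rw [if_neg him]; exact hloop
    rw [lc1655RunB, dif_neg him, dif_pos hb]
    split
    next heq => simp [hevalf]
    next nsub' child' heq => rw [hscan] at heq; exact absurd heq (by simp)
    next heq => rw [hscan] at heq; exact absurd heq (by simp)
  | case4 i state sub rest failed him hb nsub child hscan ih =>
    intro hS hG
    obtain ⟨⟨hs1, hs2, hs0, hlink⟩, htail⟩ := hG
    obtain ⟨hloopeq, hch0, hchlt, hnsublt, him2, hdfseq⟩ :=
      ((scanB_char cnt q n m failed hS i (by omega) state hb.1 sub hb.2.1).2.2) nsub child hscan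
    obtain ⟨hns, _, _⟩ := lc1655ScanB_push q _ i m failed state sub nsub child hscan
    have hmin1 : min child (2 ^ n - 1) = child := Nat.min_eq_left (by omega)
    have hmin2 : min nsub (sub - 1) = nsub := Nat.min_eq_left (by omega)
    rw [hmin1, hmin2] at ih
    have hevalc : lc1655Eval cnt q n m (i + 1, child, child) =
        lc1655Dfs cnt q n m (i + 1) child := by
      unfold lc1655Eval; rw [if_neg (by omega)]; exact hdfseq.symm
    have hevalp : lc1655Eval cnt q n m (i, state, nsub) =
        lc1655LoopA q n ((PySem.List.pyGet? cnt (i : Int)).getD 0)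
          (fun t => lc1655Dfs cnt q n m (i + 1) t) state nsub := by
      unfold lc1655Eval; exact if_neg him
    have hevalf : lc1655Eval cnt q n m (i, state, sub) =
        (lc1655Dfs cnt q n m (i + 1) child ||
          lc1655LoopA q n ((PySem.List.pyGet? cnt (i : Int)).getD 0)
            (fun t => lc1655Dfs cnt q n m (i + 1) t) state nsub) := by
      unfold lc1655Eval; rw [if_neg him]; exact hloopeq
    have hG' : lc1655Good cnt q n m ((i + 1, child, child) :: (i, state, nsub) :: rest) := by
      refine ⟨⟨hchlt, hchlt, hch0, fun _ => rfl⟩, fun hcf => ?_⟩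
      have hdfc : lc1655Dfs cnt q n m (i + 1) child = false := by
        rw [← hevalc]; exact hcf
      refine ⟨⟨hs1, hnsublt, hs0, fun hm' => ?_⟩, fun hpf => ?_⟩
      · rw [hlink hm', hloopeq, hdfc]
        simp
      · refine htail ?_
        rw [hevalf, hdfc, ← hevalp, hpf]
        rfl
    rw [lc1655RunB, dif_neg him, dif_pos hb]
    split
    next heq => rw [hscan] at heq; exact absurd heq (by simp)
    next nsub' child' heq =>
      rw [hscan] at heq
      injection heq with h1 h2
      subst h1; subst h2
      rw [hmin1, hmin2, ih hS hG']
      simp only [List.any_cons]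
      rw [hevalf, hevalc, hevalp]
      cases lc1655Dfs cnt q n m (i + 1) child <;> simp
    next heq => rw [hscan] at heq; exact absurd heq (by simp)
  | case5 i state sub rest failed him hb hscan ih =>
    intro hS hG
    obtain ⟨⟨hs1, hs2, hs0, hlink⟩, htail⟩ := hG
    have hloop := ((scanB_char cnt q n m failed hS i (by omega) state hb.1 sub hb.2.1).1) hscan
    have hevalf : lc1655Eval cnt q n m (i, state, sub) = false := by
      unfold lc1655Eval; rw [if_neg him]; exact hloop
    have hdf : lc1655Dfs cnt q n m i state = false := by
      rw [lc1655Dfs, if_neg hs0, if_neg him, hlink him]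
      exact hloop
    have hS' : lc1655Sound cnt q n m (failed.add (i, state)) := by
      intro p hp
      rcases (PySem.Set.mem_add _ _ _).mp hp with h | h
      · exact hS p h
      · subst h; exact hdf
    rw [lc1655RunB, dif_neg him, dif_pos hb]
    split
    next heq => rw [hscan] at heq; exact absurd heq (by simp)
    next nsub' child' heq => rw [hscan] at heq; exact absurd heq (by simp)
    next heq =>
      rw [ih hS' (htail hevalf)]
      simp [hevalf]
  | case6 i state sub rest failed him hb ih =>
    intro hS hG
    obtain ⟨⟨hs1, hs2, hs0, hlink⟩, htail⟩ := hG
    have hsub0 : sub = 0 := by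
      by_contra hne
      exact hb ⟨hs1, hs2, hne⟩
    have hevalf : lc1655Eval cnt q n m (i, state, sub) = false := by
      unfold lc1655Eval
      rw [if_neg him, hsub0, lc1655LoopA]
      simp
    rw [lc1655RunB, dif_neg him, dif_neg hb, ih hS (htail hevalf)]
    simp [hevalf]

-- ===== VERDICT (by name: the statement is the Claim_ definition above) =====
theorem lc_1655_spec : Claim_equal_lc_1655 := by
  intro nums quantity _
  unfold Spec_lc_1655 lc_1655 lc_1655_alt
  set n := quantity.length with hn
  set cnt := (PySem.List.sorted (PySem.Dict.counter nums).values (fun v => v) true).take n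
    with hcnt
  set full := (1 <<< n) - 1 with hfull
  have hfull2 : full + 1 = 2 ^ n := by
    rw [hfull, Nat.one_shiftLeft]
    have : 1 ≤ 2 ^ n := Nat.one_le_two_pow
    omega
  by_cases h0 : full = 0
  · rw [if_pos h0, lc1655Dfs, if_pos h0]
  · rw [if_neg h0]
    have hrun := runB_eq_any cnt quantity n cnt.length [(0, full, full)] PySem.Set.empty
      (fun p hp => by simp [PySem.Set.empty] at hp)
      ⟨⟨by show full < 2 ^ n; omega, by show full < 2 ^ n; omega, h0, fun _ => rfl⟩,
        fun _ => trivial⟩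
    rw [hrun]
    rw [lc1655Dfs]
    rw [if_neg h0]
    by_cases hm : cnt.length ≤ 0
    · rw [if_pos hm]
      have he : lc1655Eval cnt quantity n cnt.length (0, full, full) = false := by
        unfold lc1655Eval
        exact if_pos hm
      simp [he]
    · rw [if_neg hm]
      simp only [List.any_cons, List.any_nil, Bool.or_false]
      rw [lc1655Eval, if_neg hm]
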